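-- pv_equiv track=rewrite | github.com/VicenteFecedMas/pyANFIS | pyanfis/rules/rules_base.py | _check_common_antecedents
-- ===== SOURCE A (Python) =====
-- def _check_common_antecedents(
--
--         antecedent_rules: list[list[int]],
--         consequent_rules: list[list[tuple[str, str]]]
--     ) -> tuple[list[list[int]], list[list[tuple[str, str]]]]:
--     """Check and merge consequents with common antecedent"""
--     parsed_antecedent_rules: list[list[int]] = []
--     parsed_consequent_rules: list[list[tuple[str, str]]] = []
--     for i, rule in enumerate(antecedent_rules):
--         if rule not in parsed_antecedent_rules:
--             parsed_antecedent_rules.append(antecedent_rules[i])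
--             parsed_consequent_rules.append(consequent_rules[i])
--         else:
--             index = parsed_antecedent_rules.index(rule)
--             parsed_consequent_rules[index].extend(consequent_rules[i])
--
--     return parsed_antecedent_rules, parsed_consequent_rules
-- ===== SOURCE B (Python) =====
-- def _check_common_antecedents(
--         antecedent_rules: list[list[int]],
--         consequent_rules: list[list[tuple[str, str]]]
--     ) -> tuple[list[list[int]], list[list[tuple[str, str]]]]:
--     """Check and merge consequents with common antecedent.
--
--     Partition-based grouping: repeatedly take the first remaining
--     (rule, consequent) pair, split the remaining pairs into those with the
--     same antecedent (their consequents are merged, in occurrence order, into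
--     the first occurrence's consequent list, in place like the original) and
--     the rest, and continue on the rest.  No membership test against or index
--     scan of the growing output is ever made.
--     """
--     pairs = list(zip(antecedent_rules, consequent_rules))
--     ants: list[list[int]] = []
--     cons: list[list[tuple[str, str]]] = []
--     while pairs:
--         rule, c = pairs[0]
--         rest = pairs[1:]
--         extras = [item for r, cc in rest if r == rule for item in cc]
--         pairs = [(r, cc) for r, cc in rest if r != rule]
--         c.extend(extras)
--         ants.append(rule)
--         cons.append(c)
--     return ants, cons
-- ===== Notes on version B (the rewrite author's own statement) =====
-- stated objective: alternative
-- what changed: Replaces A's single pass that tests each rule against the growing output list ('not in') and re-scans it with .index by a partition-and-consume loop: take the first remaining pair, split the remaining input into same-antecedent pairs (whose consequents are merged into the first occurrence at once) and the rest, and continue on the rest; Pre_ excludes inputs where consequent_rules is shorter than antecedent_rules, on which A raises IndexError and B zip-truncates.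
import Mathlib
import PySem

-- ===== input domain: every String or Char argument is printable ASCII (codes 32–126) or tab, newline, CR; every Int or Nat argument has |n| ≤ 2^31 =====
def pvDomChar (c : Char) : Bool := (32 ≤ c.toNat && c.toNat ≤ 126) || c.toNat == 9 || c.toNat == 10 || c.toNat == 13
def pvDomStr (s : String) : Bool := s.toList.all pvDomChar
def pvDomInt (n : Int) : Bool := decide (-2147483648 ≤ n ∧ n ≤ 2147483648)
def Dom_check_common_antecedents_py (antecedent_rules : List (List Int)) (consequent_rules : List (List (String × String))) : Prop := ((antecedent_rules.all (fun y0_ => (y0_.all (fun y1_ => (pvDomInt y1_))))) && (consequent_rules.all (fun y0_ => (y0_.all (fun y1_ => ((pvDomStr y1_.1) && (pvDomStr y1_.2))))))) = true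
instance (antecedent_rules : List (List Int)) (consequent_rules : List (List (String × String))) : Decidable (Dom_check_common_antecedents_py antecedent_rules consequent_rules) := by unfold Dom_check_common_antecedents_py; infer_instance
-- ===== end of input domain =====

-- B replaces A's per-rule membership test and .index scan of the growing output by a
-- partition-and-consume loop over the remaining input (take the first pair, merge all later
-- same-antecedent consequents at once, continue on the rest). Equivalence is about the RETURN
-- value; Source B performs the same in-place extension of the caller's first-occurrence consequent
-- lists as A (value semantics: aliasing among the caller's list objects is not modeled).


-- ===== PORT A =====
-- one loop iteration of A; `none` = the IndexError of consequent_rules[i] (excluded by Pre_).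
-- `rule` and `antecedent_rules[i]` are the same object in Python, so the append uses p.2.
def pvStepA (consequent_rules : List (List (String × String)))
    (st : Option (List (List Int) × List (List (String × String))))
    (p : Int × List Int) : Option (List (List Int) × List (List (String × String))) :=
  match st with
  | none => none
  | some (pa, pc) =>
    if p.2 ∉ pa then
      match PySem.List.pyGet? consequent_rules p.1 with
      | some cs => some (pa ++ [p.2], pc ++ [cs])
      | none => none
    else
      match PySem.List.index? pa p.2, PySem.List.pyGet? consequent_rules p.1 with
      | some idx, some cs => some (pa, pc.set idx (pc.getD idx [] ++ cs))
      | _, _ => none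

def check_common_antecedents_py (antecedent_rules : List (List Int)) (consequent_rules : List (List (String × String))) : List (List Int) × (List (List (String × String))) :=
  ((PySem.List.enumerate antecedent_rules).foldl (pvStepA consequent_rules)
    (some ([], []))).getD ([], [])

-- ===== PORT B =====
-- Source B's while loop: take the first remaining pair, merge the consequents of the later
-- same-antecedent pairs into it, and continue on the pairs with a different antecedent.
-- The fuel argument (= initial length, each step strictly consumes pairs) only makes the
-- structural recursion total; the `0` branches are never reached.
def pvGroupB : Nat → List (List Int × List (String × String)) →
    List (List Int) × List (List (String × String))
  | _, [] => ([], [])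
  | 0, _ :: _ => ([], [])
  | n + 1, p :: rest =>
    let extras := ((rest.filter (fun q => q.1 == p.1)).map Prod.snd).flatten
    let rest' := rest.filter (fun q => q.1 != p.1)
    let r := pvGroupB n rest'
    (p.1 :: r.1, (p.2 ++ extras) :: r.2)

def check_common_antecedents_py_alt (antecedent_rules : List (List Int)) (consequent_rules : List (List (String × String))) : List (List Int) × (List (List (String × String))) :=
  pvGroupB (antecedent_rules.zip consequent_rules).length
    (antecedent_rules.zip consequent_rules)

-- ===== PRECONDITION & SPEC =====
-- A indexes consequent_rules[i] for every i below len(antecedent_rules): it raises IndexError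
-- when consequent_rules is shorter, so exactly those inputs are excluded.
def Pre_check_common_antecedents_py (antecedent_rules : List (List Int)) (consequent_rules : List (List (String × String))) : Prop :=
  antecedent_rules.length ≤ consequent_rules.length
instance (antecedent_rules : List (List Int)) (consequent_rules : List (List (String × String))) : Decidable (Pre_check_common_antecedents_py antecedent_rules consequent_rules) := by unfold Pre_check_common_antecedents_py; infer_instance

def pvWitness_check_common_antecedents_py : List (List Int) × (List (List (String × String))) :=
  ([[1], [1]], [[("a", "b")], [("c", "d")]])

def Spec_check_common_antecedents_py (antecedent_rules : List (List Int)) (consequent_rules : List (List (String × String))) (out : List (List Int) × (List (List (String × String)))) : Prop := out = check_common_antecedents_py_alt antecedent_rules consequent_rules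
instance (antecedent_rules : List (List Int)) (consequent_rules : List (List (String × String))) (out : List (List Int) × (List (List (String × String)))) : Decidable (Spec_check_common_antecedents_py antecedent_rules consequent_rules out) := by unfold Spec_check_common_antecedents_py; infer_instance

-- ===== CLAIM (what is proved, stated in full; the proofs are below) =====
def Claim_equal_check_common_antecedents_py : Prop := ∀ (antecedent_rules : List (List Int)) (consequent_rules : List (List (String × String))), Dom_check_common_antecedents_py antecedent_rules consequent_rules → Pre_check_common_antecedents_py antecedent_rules consequent_rules → Spec_check_common_antecedents_py antecedent_rules consequent_rules (check_common_antecedents_py antecedent_rules consequent_rules)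


-- ===== LEMMAS AND PROOFS =====

-- A's loop body with the option layer removed: the pure step on the parallel lists
def pvStepP (st : List (List Int) × List (List (String × String)))
    (p : List Int × List (String × String)) :
    List (List Int) × List (List (String × String)) :=
  if p.1 ∉ st.1 then (st.1 ++ [p.1], st.2 ++ [p.2])
  else (st.1, st.2.set (st.1.idxOf p.1) (st.2.getD (st.1.idxOf p.1) [] ++ p.2))

-- canonical description, fuelled like pvGroupB: the first-occurrence keys …
def pvFAux : Nat → List (List Int × List (String × String)) → List (List Int)
  | _, [] => []
  | 0, _ :: _ => []
  | n + 1, p :: rest => p.1 :: pvFAux n (rest.filter (fun q => q.1 != p.1))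

def pvF (l : List (List Int × List (String × String))) : List (List Int) :=
  pvFAux l.length l

-- … and all consequents carrying a key, concatenated in order
def pvGather (l : List (List Int × List (String × String))) (k : List Int) :
    List (String × String) :=
  ((l.filter (fun q => q.1 == k)).map Prod.snd).flatten

lemma pvFAux_fuel : ∀ (n m : Nat) (l : List (List Int × List (String × String))),
    l.length ≤ n → l.length ≤ m → pvFAux n l = pvFAux m l := by
  intro n
  induction n with
  | zero =>
    intro m l hn _
    rcases l with _ | ⟨p, rest⟩
    · cases m <;> rfl
    · simp at hn
  | succ n ih =>
    intro m l hn hm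
    rcases l with _ | ⟨p, rest⟩
    · cases m <;> rfl
    · rcases m with _ | m
      · simp at hm
      · simp only [pvFAux]
        have hr := List.length_filter_le (fun q => q.1 != p.1) rest
        simp only [List.length_cons] at hn hm
        rw [ih m _ (by omega) (by omega)]

lemma pvF_nil : pvF [] = [] := rfl

lemma pvF_cons (p : List Int × List (String × String))
    (rest : List (List Int × List (String × String))) :
    pvF (p :: rest) = p.1 :: pvF (rest.filter (fun q => q.1 != p.1)) := by
  show pvFAux (rest.length + 1) (p :: rest) = _
  simp only [pvFAux]
  rw [pvFAux_fuel rest.length _ _ (List.length_filter_le _ _) le_rfl]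
  rfl

-- members of pvF are keys of the list
lemma pvF_mem : ∀ (l : List (List Int × List (String × String))) (k : List Int),
    k ∈ pvF l → ∃ q ∈ l, q.1 = k := by
  have aux : ∀ (n : Nat) (l : List (List Int × List (String × String))) (k : List Int),
      l.length ≤ n → k ∈ pvF l → ∃ q ∈ l, q.1 = k := by
    intro n
    induction n with
    | zero =>
      intro l k hn hk
      rcases l with _ | ⟨p, rest⟩
      · simp [pvF_nil] at hk
      · simp at hn
    | succ n ih =>
      intro l k hn hk
      rcases l with _ | ⟨p, rest⟩
      · simp [pvF_nil] at hk
      · rw [pvF_cons] at hk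
        rcases List.mem_cons.mp hk with h | h
        · exact ⟨p, by simp, h.symm⟩
        · have hlen : (rest.filter (fun q => q.1 != p.1)).length ≤ n := by
            have := List.length_filter_le (fun q => q.1 != p.1) rest
            simp only [List.length_cons] at hn
            omega
          obtain ⟨q, hq, hqk⟩ := ih _ k hlen h
          exact ⟨q, List.mem_cons_of_mem p (List.mem_of_mem_filter hq), hqk⟩
  exact fun l k => aux l.length l k le_rfl

lemma pvIndex?_idxOf (pa : List (List Int)) (r : List Int) (hmem : r ∈ pa) :
    PySem.List.index? pa r = some (pa.idxOf r) := by
  have h1 : (PySem.List.index? pa r).isSome := (PySem.List.index?_isSome_iff pa r).mpr hmem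
  obtain ⟨k, hk⟩ := Option.isSome_iff_exists.mp h1
  have h2 : pa.idxOf r = k := by
    rw [List.idxOf_eq_getD_idxOf?, ← PySem.List.index?_eq_idxOf?, hk]; rfl
  rw [hk, h2]

lemma pvStepA_eq (cl : List (List (String × String))) (pa : List (List Int))
    (pc : List (List (String × String))) (k : Nat) (r : List Int)
    (cs : List (String × String)) (hcs : cl[k]? = some cs) :
    pvStepA cl (some (pa, pc)) ((k : Int), r) = some (pvStepP (pa, pc) (r, cs)) := by
  have hget : PySem.List.pyGet? cl (k : Int) = some cs := by
    simp [hcs]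
  by_cases hmem : r ∈ pa
  · have hidx : List.idxOf? r pa = some (pa.idxOf r) := by
      rw [← PySem.List.index?_eq_idxOf?]; exact pvIndex?_idxOf pa r hmem
    simp [pvStepA, pvStepP, hmem, hidx, hget]
  · simp [pvStepA, pvStepP, hmem, hget]

lemma pvEnum_fold (cl : List (List (String × String))) :
    ∀ (xs : List (List Int)) (k : Nat) (pa : List (List Int))
      (pc : List (List (String × String))), k + xs.length ≤ cl.length →
    (PySem.List.enumerate xs (k : Int)).foldl (pvStepA cl) (some (pa, pc))
      = some ((xs.zip (cl.drop k)).foldl pvStepP (pa, pc)) := by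
  intro xs
  induction xs with
  | nil => intro k pa pc _; simp [PySem.List.enumerate_nil]
  | cons x xs ih =>
    intro k pa pc hlen
    have hk : k < cl.length := by simp [List.length_cons] at hlen; omega
    have hcs : cl[k]? = some cl[k] := List.getElem?_eq_getElem hk
    rw [PySem.List.enumerate_cons, List.drop_eq_getElem_cons hk]
    simp only [List.zip_cons_cons, List.foldl_cons, pvStepA_eq cl pa pc k x cl[k] hcs]
    have hcast : ((k : Int) + 1) = ((k + 1 : Nat) : Int) := by push_cast; ring
    rcases hst : pvStepP (pa, pc) (x, cl[k]) with ⟨pa', pc'⟩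
    rw [hcast]
    exact ih (k + 1) pa' pc' (by simp [List.length_cons] at hlen ⊢; omega)

-- setting a mapped list at the unique index of r is remapping with an updated function
lemma pvMapSet (pa : List (List Int)) (r : List Int)
    (f : List Int → List (String × String)) (v : List (String × String))
    (hnd : pa.Nodup) (hmem : r ∈ pa) :
    (pa.map f).set (pa.idxOf r) v = pa.map (fun k => if k = r then v else f k) := by
  induction pa with
  | nil => simp at hmem
  | cons a pa ih =>
    by_cases har : a = r
    · subst har
      have hnotin : a ∉ pa := (List.nodup_cons.mp hnd).1
      simp only [List.map_cons, List.idxOf_cons_self, List.set_cons_zero, if_true]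
      congr 1
      apply List.map_congr_left
      intro k hk
      have : k ≠ a := fun h => hnotin (h ▸ hk)
      simp [this]
    · have hr' : r ∈ pa := (List.mem_cons.mp hmem).resolve_left (fun h => har h.symm)
      rw [List.idxOf_cons_ne pa har]
      simp only [List.map_cons, Nat.succ_eq_add_one, List.set_cons_succ,
        ih (List.nodup_cons.mp hnd).2 hr']
      rw [if_neg har]

-- the generalized fold invariant: A's pure loop computes the canonical grouping
lemma pvFold_inv :
    ∀ (l : List (List Int × List (String × String))) (pa : List (List Int))
      (f : List Int → List (String × String)), pa.Nodup →
    l.foldl pvStepP (pa, pa.map f)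
      = (pa ++ pvF (l.filter (fun q => decide (q.1 ∉ pa))),
         (pa ++ pvF (l.filter (fun q => decide (q.1 ∉ pa)))).map
           (fun k => (if k ∈ pa then f k else []) ++ pvGather l k)) := by
  intro l
  induction l with
  | nil =>
    intro pa f hnd
    simp only [List.foldl_nil, List.filter_nil, pvF_nil, List.append_nil]
    refine congrArg _ ?_
    apply List.map_congr_left
    intro k hk
    simp [pvGather, hk]
  | cons p l ih =>
    intro pa f hnd
    by_cases hmem : p.1 ∈ pa
    · -- duplicate key: set at idxOf
      have hidx : pa.idxOf p.1 < pa.length := List.idxOf_lt_length_of_mem hmem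
      have hgetD : (pa.map f).getD (pa.idxOf p.1) [] = f p.1 := by
        rw [List.getD_eq_getElem?_getD, List.getElem?_map,
          List.getElem?_eq_getElem hidx]
        simp [List.getElem_idxOf hidx]
      have hstep : pvStepP (pa, pa.map f) p
          = (pa, pa.map (fun k => if k = p.1 then f p.1 ++ p.2 else f k)) := by
        show (if p.1 ∉ pa then _ else _) = _
        rw [if_neg (not_not_intro hmem)]
        rw [hgetD, pvMapSet pa p.1 f (f p.1 ++ p.2) hnd hmem]
      simp only [List.foldl_cons, hstep]
      rw [ih pa _ hnd]
      have hfilt : (p :: l).filter (fun q => decide (q.1 ∉ pa))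
          = l.filter (fun q => decide (q.1 ∉ pa)) := by
        rw [List.filter_cons]; simp [hmem]
      rw [hfilt]
      refine congrArg _ ?_
      apply List.map_congr_left
      intro k hk
      by_cases hkp : k = p.1
      · subst hkp
        simp only [if_pos hmem, pvGather, List.filter_cons]
        simp [List.append_assoc]
      · have hne : ¬ (p.1 == k) = true := by simp only [beq_iff_eq]; exact fun h => hkp h.symm
        simp [pvGather, hne, hkp]
    · -- new key: append
      have hstep : pvStepP (pa, pa.map f) p = (pa ++ [p.1], pa.map f ++ [p.2]) := by
        show (if p.1 ∉ pa then _ else _) = _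
        rw [if_pos hmem]
      have hf2 : pa.map f ++ [p.2]
          = (pa ++ [p.1]).map (fun k => if k = p.1 then p.2 else f k) := by
        rw [List.map_append]
        congr 1
        · apply List.map_congr_left
          intro k hk
          have : k ≠ p.1 := fun h => hmem (h ▸ hk)
          simp [this]
        · simp
      have hnd2 : (pa ++ [p.1]).Nodup := by
        rw [List.nodup_append]
        exact ⟨hnd, List.nodup_singleton _, by
          intro x hx y hy
          rw [List.mem_singleton] at hy
          subst hy
          exact fun h => hmem (h ▸ hx)⟩
      simp only [List.foldl_cons, hstep, hf2]
      rw [ih (pa ++ [p.1]) _ hnd2]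
      have hfilt : (p :: l).filter (fun q => decide (q.1 ∉ pa))
          = p :: l.filter (fun q => decide (q.1 ∉ pa)) := by
        rw [List.filter_cons]; simp [hmem]
      have hfilt2 : l.filter (fun q => decide (q.1 ∉ pa ++ [p.1]))
          = (l.filter (fun q => decide (q.1 ∉ pa))).filter (fun q => q.1 != p.1) := by
        rw [List.filter_filter]
        apply List.filter_congr
        intro q _
        by_cases h1 : q.1 = p.1 <;> by_cases h2 : q.1 ∈ pa <;> simp [h1, h2]
      have hkeys : pa ++ [p.1] ++ pvF (l.filter (fun q => decide (q.1 ∉ pa ++ [p.1])))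
          = pa ++ pvF ((p :: l).filter (fun q => decide (q.1 ∉ pa))) := by
        rw [hfilt, hfilt2, pvF_cons, List.append_assoc]
        rfl
      rw [hkeys]
      refine congrArg _ ?_
      apply List.map_congr_left
      intro k hk
      rw [← hkeys] at hk
      by_cases hkp : k = p.1
      · subst hkp
        simp [hmem, pvGather]
      · have hkfacts : k ∈ pa ∨ k ∈ pvF (l.filter (fun q => decide (q.1 ∉ pa ++ [p.1]))) := by
          rcases List.mem_append.mp hk with h | h
          · rcases List.mem_append.mp h with h | h
            · exact Or.inl h
            · exact absurd (List.mem_singleton.mp h) hkp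
          · exact Or.inr h
        have hsame : (if k ∈ pa ++ [p.1] then (if k = p.1 then p.2 else f k) else [])
            = (if k ∈ pa then f k else []) := by
          rcases hkfacts with h | h
          · simp [h, hkp, List.mem_append]
          · obtain ⟨q, hq, hqk⟩ := pvF_mem _ _ h
            have hqf := List.of_mem_filter hq
            have hknotin : k ∉ pa ++ [p.1] := by
              subst hqk; simpa using hqf
            have hknotpa : k ∉ pa := fun hh => hknotin (List.mem_append_left _ hh)
            simp [hknotin, hknotpa]
        rw [hsame]
        have hg : pvGather (p :: l) k = pvGather l k := by
          have hne : ¬ (p.1 == k) = true := by simp only [beq_iff_eq]; exact fun h => hkp h.symm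
          simp [pvGather, hne]
        rw [hg]

-- B's partition loop computes the same canonical grouping
lemma pvGroupB_eq :
    ∀ (n : Nat) (l : List (List Int × List (String × String))), l.length ≤ n →
      pvGroupB n l = (pvF l, (pvF l).map (pvGather l)) := by
  intro n
  induction n with
  | zero =>
    intro l hn
    rcases l with _ | ⟨p, rest⟩
    · simp [pvGroupB, pvF_nil]
    · simp at hn
  | succ n ih =>
    intro l hn
    rcases l with _ | ⟨p, rest⟩
    · simp [pvGroupB, pvF_nil]
    · have hlen : (rest.filter (fun q => q.1 != p.1)).length ≤ n := by
        have := List.length_filter_le (fun q => q.1 != p.1) rest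
        simp only [List.length_cons] at hn
        omega
      rw [pvF_cons]
      simp only [pvGroupB]
      rw [ih _ hlen]
      have hhead : p.2 ++ ((rest.filter (fun q => q.1 == p.1)).map Prod.snd).flatten
          = pvGather (p :: rest) p.1 := by
        simp [pvGather]
      have htail : (pvF (rest.filter (fun q => q.1 != p.1))).map
            (pvGather (rest.filter (fun q => q.1 != p.1)))
          = (pvF (rest.filter (fun q => q.1 != p.1))).map (pvGather (p :: rest)) := by
        apply List.map_congr_left
        intro k hk
        obtain ⟨q, hq, hqk⟩ := pvF_mem _ _ hk
        have hqne := List.of_mem_filter hq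
        rw [hqk] at hqne
        have hkp : k ≠ p.1 := by simpa using hqne
        have h1 : ¬ (p.1 == k) = true := by simp only [beq_iff_eq]; exact fun h => hkp h.symm
        simp only [pvGather, List.filter_cons, h1, List.filter_filter]
        congr 2
        apply List.filter_congr
        intro q' _
        by_cases h : q'.1 = k <;> simp [h, hkp]
      simp only [List.map_cons, hhead, htail]

-- ===== VERDICT (by name: the statement is the Claim_ definition above) =====
theorem check_common_antecedents_py_spec : Claim_equal_check_common_antecedents_py := by
  intro a c _ hpre
  unfold Spec_check_common_antecedents_py
  unfold check_common_antecedents_py check_common_antecedents_py_alt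
  have henum : PySem.List.enumerate a = PySem.List.enumerate a ((0 : Nat) : Int) := rfl
  rw [henum, pvEnum_fold c a 0 [] [] (by simpa using hpre), List.drop_zero, Option.getD_some]
  have h0 : ((a.zip c).filter (fun q => decide (q.1 ∉ ([] : List (List Int)))))
      = a.zip c := by
    apply List.filter_eq_self.mpr
    intro q _
    simp
  have hinv := pvFold_inv (a.zip c) [] (fun _ => []) List.nodup_nil
  simp only [List.map_nil, List.nil_append, h0] at hinv
  rw [hinv, pvGroupB_eq (a.zip c).length (a.zip c) le_rfl]
  refine congrArg _ ?_
  apply List.map_congr_left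
  intro k _
  simp
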